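-- pv_equiv track=rewrite | github.com/pratham4544/gcc-tbc-computer-passage-typing-exam-demo | app.py | _format_passage_for_display
-- ===== SOURCE A (Python) =====
-- def _format_passage_for_display(text: str) -> str:
--     normalized = text.replace("\r\n", "\n")
--     lines = normalized.split("\n")
--     for index, line in enumerate(lines):
--         if line.strip():
--             if not line.startswith("\t"):
--                 lines[index] = f"\t{line}"
--             break
--     return "\n".join(lines)
-- ===== SOURCE B (Python) =====
-- def _format_passage_for_display(text: str) -> str:
--     # One-pass character scan: track the start of the current line; at the first
--     # non-whitespace character, insert a tab at that line's start unless it is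
--     # already a tab. No split/join of lines.
--     normalized = text.replace("\r\n", "\n")
--     start = 0
--     for i, ch in enumerate(normalized):
--         if ch == "\n":
--             start = i + 1
--         elif not ch.isspace():
--             if normalized[start] != "\t":
--                 return normalized[:start] + "\t" + normalized[start:]
--             return normalized
--     return normalized
-- ===== Notes on version B (the rewrite author's own statement) =====
-- stated objective: alternative
-- what changed: Replaced A's split-into-lines / fix-first-non-blank-line / join pipeline by a single character scan over the normalized string that tracks the current line start and splices one tab into the string at that position.
import Mathlib
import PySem

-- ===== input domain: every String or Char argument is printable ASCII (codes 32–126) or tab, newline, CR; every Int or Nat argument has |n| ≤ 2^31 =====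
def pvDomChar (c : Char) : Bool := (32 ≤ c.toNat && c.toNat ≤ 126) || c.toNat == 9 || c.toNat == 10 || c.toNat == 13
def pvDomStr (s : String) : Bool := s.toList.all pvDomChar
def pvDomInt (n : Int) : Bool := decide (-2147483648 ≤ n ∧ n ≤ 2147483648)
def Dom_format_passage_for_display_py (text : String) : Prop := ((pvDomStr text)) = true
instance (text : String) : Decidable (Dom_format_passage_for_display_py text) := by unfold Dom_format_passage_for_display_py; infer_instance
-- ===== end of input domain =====

-- B replaces A's split-into-lines / fix-first-nonblank-line / join pipeline by a single
-- character scan that tracks the current line start and splices one tab into the string.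

-- ===== PORT A =====
-- A's for-loop with break over the split lines: modify the first line whose strip is truthy.
def fixLinesA : List (List Char) → List (List Char)
  | [] => []
  | l :: rest =>
    if PySem.Chars.strip l = [] then l :: fixLinesA rest
    else (if PySem.Chars.startswith l ['\t'] then l else '\t' :: l) :: rest

def format_passage_for_display_py (text : String) : String :=
  -- normalized = text.replace("\r\n","\n"); lines = normalized.split("\n"); "\n".join(...)
  String.ofList (PySem.Chars.join ['\n']
    (fixLinesA (PySem.Chars.splitOn (PySem.Chars.replace text.toList "\r\n".toList "\n".toList) ['\n'])))

-- ===== PORT B =====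
-- B's for-loop over (index, char): `start` is the start of the current line; returns the
-- insertion position at the first non-whitespace character, none if the scan falls through.
def bScan : List Char → Nat → Nat → Option Nat
  | [], _, _ => none
  | c :: cs, i, start =>
    if c = '\n' then bScan cs (i + 1) (i + 1)
    else if PySem.Chars.isspace c then bScan cs (i + 1) start
    else some start

-- the early-return body on the scan's outcome; normalized[start] != "\t" is a safe index
-- (start ≤ the scan's hit position) and normalized[:start] + "\t" + normalized[start:]
-- is exact as take/drop since 0 ≤ start ≤ len
def bAlt (normalized : List Char) : List Char :=
  match bScan normalized 0 0 with
  | none => normalized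
  | some start =>
    if normalized[start]? = some '\t' then normalized
    else normalized.take start ++ '\t' :: normalized.drop start

def format_passage_for_display_py_alt (text : String) : String :=
  String.ofList (bAlt (PySem.Chars.replace text.toList "\r\n".toList "\n".toList))

-- ===== PRECONDITION & SPEC =====
def Spec_format_passage_for_display_py (text : String) (out : String) : Prop := out = format_passage_for_display_py_alt text
instance (text : String) (out : String) : Decidable (Spec_format_passage_for_display_py text out) := by unfold Spec_format_passage_for_display_py; infer_instance

-- ===== CLAIM (what is proved, stated in full; the proofs are below) =====
def Claim_equal_format_passage_for_display_py : Prop := ∀ (text : String), Dom_format_passage_for_display_py text → Spec_format_passage_for_display_py text (format_passage_for_display_py text)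

-- ===== LEMMAS AND PROOFS =====

-- PySem's fuel-based splitOn on a one-char separator is Lean's List.splitOn.
theorem splitOn_go_spec (c : Char) :
    ∀ (fuel : Nat) (l cur : List Char) (acc : List (List Char)), l.length ≤ fuel →
      PySem.Chars.splitOn.go [c] fuel l cur acc =
        acc.reverse ++ (cur.reverse ++ (l.splitOn c).headI) :: (l.splitOn c).tail := by
  intro fuel
  induction fuel with
  | zero =>
    intro l cur acc h
    have hl : l = [] := List.eq_nil_of_length_eq_zero (Nat.le_zero.mp h)
    subst hl
    rw [PySem.Chars.splitOn.go]
    simp [List.splitOn]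
  | succ n ih =>
    intro l cur acc h
    cases l with
    | nil =>
      rw [PySem.Chars.splitOn.go]
      · simp [List.splitOn]
      · omega
    | cons x rest =>
      rw [PySem.Chars.splitOn.go]
      by_cases hx : x = c
      · subst hx
        have hpre : [x].isPrefixOf (x :: rest) = true := by simp [List.isPrefixOf]
        rw [if_pos hpre]
        rw [ih (List.drop [x].length (x :: rest)) [] (cur.reverse :: acc) (by simp at h ⊢; omega)]
        obtain ⟨hh, ht, hr⟩ := List.exists_cons_of_ne_nil (List.splitOnP_ne_nil (fun a => a == x) rest)
        simp [List.splitOn, List.splitOnP_cons, hr]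
      · have hpre : [c].isPrefixOf (x :: rest) = false := by
          simp [List.isPrefixOf]
          exact fun hc => absurd hc.symm hx
        rw [if_neg (by simp [hpre])]
        rw [ih rest (x :: cur) acc (by simp at h; omega)]
        have hne := List.splitOnP_ne_nil (fun a => a == c) rest
        obtain ⟨hh, ht, hrest⟩ := List.exists_cons_of_ne_nil hne
        simp [List.splitOn, List.splitOnP_cons, hx, hrest]

theorem splitOn_bridge (cs : List Char) (c : Char) :
    PySem.Chars.splitOn cs [c] = cs.splitOn c := by
  unfold PySem.Chars.splitOn
  rw [splitOn_go_spec c (cs.length + 1) cs [] [] (by omega)]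
  have hne := List.splitOnP_ne_nil (fun a => a == c) cs
  obtain ⟨hh, ht, hcs⟩ := List.exists_cons_of_ne_nil (by simpa [List.splitOn] using hne)
  simp only [List.splitOn, hcs]
  rfl

-- every piece of splitOn c is free of c
theorem not_mem_of_mem_splitOn (c : Char) :
    ∀ (cs : List Char) (l : List Char), l ∈ cs.splitOn c → c ∉ l := by
  intro cs
  induction cs with
  | nil => intro l hl; simp [List.splitOn] at hl; simp [hl]
  | cons x rest ih =>
    intro l hl
    simp only [List.splitOn, List.splitOnP_cons] at hl ih
    by_cases hx : x = c
    · subst hx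
      simp at hl
      rcases hl with h | h
      · simp [h]
      · exact ih l h
    · obtain ⟨hh, ht, hrest⟩ := List.exists_cons_of_ne_nil (List.splitOnP_ne_nil (fun a => a == c) rest)
      rw [hrest] at hl
      simp [hx] at hl
      rcases hl with h | h
      · subst h
        intro hmem
        rcases List.mem_cons.mp hmem with h' | h'
        · exact hx h'.symm
        · exact ih hh (by rw [hrest]; exact List.mem_cons_self) h'
      · exact ih l (by rw [hrest]; exact List.mem_cons_of_mem _ h)

-- Python-truthiness of line.strip(): strip l = [] iff every char is whitespace
theorem strip_eq_nil_iff (l : List Char) :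
    PySem.Chars.strip l = [] ↔ ∀ x ∈ l, PySem.Chars.isspace x = true := by
  unfold PySem.Chars.strip PySem.Chars.rstrip PySem.Chars.lstrip
  constructor
  · intro h x hx
    have h2 : List.dropWhile PySem.Chars.isspace (List.dropWhile PySem.Chars.isspace l).reverse = [] := by
      simpa using congrArg List.reverse h
    have hall : ∀ y ∈ List.dropWhile PySem.Chars.isspace l, PySem.Chars.isspace y = true := by
      intro y hy
      exact List.dropWhile_eq_nil_iff.mp h2 y (by simpa using hy)
    have hx' : x ∈ List.takeWhile PySem.Chars.isspace l ++ List.dropWhile PySem.Chars.isspace l := by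
      rw [List.takeWhile_append_dropWhile]; exact hx
    rcases List.mem_append.mp hx' with h' | h'
    · exact List.mem_takeWhile_imp h'
    · exact hall x h'
  · intro h
    rw [List.dropWhile_eq_nil_iff.mpr h]
    rfl

-- bScan shift: the indices are relative bookkeeping
theorem bScan_shift (cs : List Char) :
    ∀ (i s d : Nat), bScan cs (i + d) (s + d) = (bScan cs i s).map (· + d) := by
  induction cs with
  | nil => intro i s d; rfl
  | cons c rest ih =>
    intro i s d
    by_cases hc : c = '\n'
    · simp only [bScan, if_pos hc]
      have : i + d + 1 = (i + 1) + d := by omega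
      rw [this, ih]
    · by_cases hw : PySem.Chars.isspace c
      · simp only [bScan, if_neg hc, if_pos hw]
        have : i + d + 1 = (i + 1) + d := by omega
        rw [this, ih]
      · simp [bScan, hc, hw]

-- scanning past an all-whitespace newline-free block just advances the index
theorem bScan_blank_append :
    ∀ (l tail : List Char) (i s : Nat), (∀ x ∈ l, PySem.Chars.isspace x = true) → '\n' ∉ l →
      bScan (l ++ tail) i s = bScan tail (i + l.length) s := by
  intro l
  induction l with
  | nil => intro tail i s _ _; simp
  | cons c rest ih =>
    intro tail i s hws hnl
    have hc : c ≠ '\n' := fun h => hnl (h ▸ List.mem_cons_self)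
    have hw : PySem.Chars.isspace c = true := hws c List.mem_cons_self
    simp only [List.cons_append, bScan, if_neg hc, if_pos hw]
    rw [ih tail (i + 1) s (fun x hx => hws x (List.mem_cons_of_mem _ hx))
      (fun h => hnl (List.mem_cons_of_mem _ h))]
    congr 1
    simp; omega

-- a newline-free block with a non-whitespace char makes the scan return the current start
theorem bScan_nonblank :
    ∀ (l tail : List Char) (i s : Nat), '\n' ∉ l → (∃ x ∈ l, PySem.Chars.isspace x = false) →
      bScan (l ++ tail) i s = some s := by
  intro l
  induction l with
  | nil => intro tail i s _ hx; obtain ⟨x, hx, _⟩ := hx; cases hx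
  | cons c rest ih =>
    intro tail i s hnl hx
    have hc : c ≠ '\n' := fun h => hnl (h ▸ List.mem_cons_self)
    by_cases hw : PySem.Chars.isspace c
    · simp only [List.cons_append, bScan, if_neg hc, if_pos hw]
      apply ih tail (i + 1) s (fun h => hnl (List.mem_cons_of_mem _ h))
      obtain ⟨x, hmem, hxw⟩ := hx
      rcases List.mem_cons.mp hmem with h | h
      · rw [h] at hxw; rw [hxw] at hw; cases hw
      · exact ⟨x, h, hxw⟩
    · simp [bScan, hc, hw]

-- reductions of bAlt by the scan's outcome
theorem bAlt_scan_none (cs : List Char) (h : bScan cs 0 0 = none) : bAlt cs = cs := by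
  unfold bAlt; rw [h]

theorem bAlt_scan_tab (cs : List Char) (s : Nat) (h : bScan cs 0 0 = some s)
    (ht : cs[s]? = some '\t') : bAlt cs = cs := by
  unfold bAlt; rw [h]; simp [ht]

theorem bAlt_scan_ins (cs : List Char) (s : Nat) (h : bScan cs 0 0 = some s)
    (ht : cs[s]? ≠ some '\t') : bAlt cs = cs.take s ++ '\t' :: cs.drop s := by
  unfold bAlt; rw [h]; simp [ht]

-- join over a nonempty tail
theorem join_cons_ne_nil (sep l : List Char) (M : List (List Char)) (h : M ≠ []) :
    PySem.Chars.join sep (l :: M) = l ++ sep ++ PySem.Chars.join sep M := by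
  cases M with
  | nil => cases h rfl
  | cons m t => rw [PySem.Chars.join_cons_cons]

theorem fixLinesA_ne_nil (lines : List (List Char)) (h : lines ≠ []) : fixLinesA lines ≠ [] := by
  cases lines with
  | nil => cases h rfl
  | cons l rest => unfold fixLinesA; split_ifs <;> simp

-- main lemma: B's splice equals A's per-line fix, on any nonempty newline-free line list
theorem bAlt_eq_fix : ∀ (lines : List (List Char)), lines ≠ [] →
    (∀ l ∈ lines, '\n' ∉ l) →
    bAlt (PySem.Chars.join ['\n'] lines) = PySem.Chars.join ['\n'] (fixLinesA lines) := by
  intro lines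
  induction lines with
  | nil => intro hne; cases hne rfl
  | cons l rest ih =>
    intro _ hnl
    have hlnl : '\n' ∉ l := hnl l List.mem_cons_self
    by_cases hblank : ∀ x ∈ l, PySem.Chars.isspace x = true
    · -- first line blank: A keeps it, B scans past it
      have hstrip : PySem.Chars.strip l = [] := (strip_eq_nil_iff l).mpr hblank
      cases rest with
      | nil =>
        rw [PySem.Chars.join_singleton]
        have hsc : bScan l 0 0 = none := by
          have := bScan_blank_append l [] 0 0 hblank hlnl
          simpa using this
        rw [bAlt_scan_none l hsc]
        rw [fixLinesA, if_pos hstrip]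
        simp [fixLinesA, PySem.Chars.join_singleton]
      | cons r t =>
        have hrne : (r :: t : List (List Char)) ≠ [] := by simp
        have hjoin : PySem.Chars.join ['\n'] (l :: r :: t) = l ++ '\n' :: PySem.Chars.join ['\n'] (r :: t) := by
          rw [PySem.Chars.join_cons_cons]; simp
        set J := PySem.Chars.join ['\n'] (r :: t) with hJ
        have hscan : bScan (l ++ '\n' :: J) 0 0 = (bScan J 0 0).map (· + (l.length + 1)) := by
          rw [bScan_blank_append l ('\n' :: J) 0 0 hblank hlnl]
          simp only [bScan]
          have := bScan_shift J 0 0 (l.length + 1)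
          simpa using this
        have ihr := ih hrne (fun x hx => hnl x (List.mem_cons_of_mem _ hx))
        have hfixj : PySem.Chars.join ['\n'] (fixLinesA (l :: r :: t)) =
            l ++ '\n' :: PySem.Chars.join ['\n'] (fixLinesA (r :: t)) := by
          rw [fixLinesA, if_pos hstrip,
            join_cons_ne_nil ['\n'] l (fixLinesA (r :: t)) (fixLinesA_ne_nil _ hrne)]
          simp
        rw [hjoin, hfixj]
        cases hb : bScan J 0 0 with
        | none =>
          have hsc : bScan (l ++ '\n' :: J) 0 0 = none := by rw [hscan, hb]; rfl
          rw [bAlt_scan_none _ hsc, ← ihr, bAlt_scan_none J hb]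
        | some s =>
          have hsc : bScan (l ++ '\n' :: J) 0 0 = some (s + (l.length + 1)) := by
            rw [hscan, hb]; rfl
          have hidx : (l ++ '\n' :: J)[s + (l.length + 1)]? = J[s]? := by
            rw [List.getElem?_append_right (by omega)]
            have : s + (l.length + 1) - l.length = s + 1 := by omega
            simp [this]
          by_cases htab : J[s]? = some '\t'
          · rw [bAlt_scan_tab _ _ hsc (by rw [hidx]; exact htab), ← ihr, bAlt_scan_tab J s hb htab]
          · rw [bAlt_scan_ins _ _ hsc (by rw [hidx]; exact htab), ← ihr, bAlt_scan_ins J s hb htab]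
            have htake : (l ++ '\n' :: J).take (s + (l.length + 1)) = l ++ '\n' :: J.take s := by
              rw [List.take_append]
              have h1 : s + (l.length + 1) - l.length = s + 1 := by omega
              rw [h1]
              simp
              omega
            have hdrop : (l ++ '\n' :: J).drop (s + (l.length + 1)) = J.drop s := by
              rw [List.drop_append]
              have h1 : s + (l.length + 1) - l.length = s + 1 := by omega
              rw [h1]
              simp
              omega
            rw [htake, hdrop]
            simp
    · -- first line has a non-whitespace char: both act on it and stop
      push Not at hblank
      obtain ⟨x, hxmem, hxws⟩ := hblank
      have hxws' : PySem.Chars.isspace x = false := by simpa using hxws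
      have hstrip : PySem.Chars.strip l ≠ [] := fun h =>
        by rw [strip_eq_nil_iff] at h; rw [h x hxmem] at hxws'; cases hxws'
      have hlne : l ≠ [] := fun h => by subst h; cases hxmem
      obtain ⟨c0, l', hl⟩ := List.exists_cons_of_ne_nil hlne
      have hstarts : PySem.Chars.startswith l ['\t'] = decide (c0 = '\t') := by
        subst hl
        simp only [PySem.Chars.startswith, List.isPrefixOf]
        by_cases h : c0 = '\t'
        · simp [h]
        · simp [h]
          exact fun hq => h hq.symm
      cases rest with
      | nil =>
        rw [PySem.Chars.join_singleton]
        have hsc : bScan l 0 0 = some 0 := by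
          have := bScan_nonblank l [] 0 0 hlnl ⟨x, hxmem, hxws'⟩
          simpa using this
        rw [fixLinesA, if_neg hstrip, hstarts, PySem.Chars.join_singleton]
        by_cases hc0 : c0 = '\t'
        · rw [bAlt_scan_tab l 0 hsc (by simp [hl, hc0])]
          simp [hc0]
        · rw [bAlt_scan_ins l 0 hsc (by simp [hl, hc0])]
          simp [hl, hc0]
      | cons r t =>
        have hjoin : PySem.Chars.join ['\n'] (l :: r :: t) = l ++ '\n' :: PySem.Chars.join ['\n'] (r :: t) := by
          rw [PySem.Chars.join_cons_cons]; simp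
        set J := PySem.Chars.join ['\n'] (r :: t) with hJ
        have hsc : bScan (l ++ '\n' :: J) 0 0 = some 0 :=
          bScan_nonblank l ('\n' :: J) 0 0 hlnl ⟨x, hxmem, hxws'⟩
        have hfix : fixLinesA (l :: r :: t) =
            (if PySem.Chars.startswith l ['\t'] then l else '\t' :: l) :: r :: t := by
          rw [fixLinesA, if_neg hstrip]
        rw [hjoin, hfix, hstarts]
        by_cases hc0 : c0 = '\t'
        · rw [bAlt_scan_tab _ 0 hsc (by simp [hl, hc0])]
          simp only [hc0, decide_true, if_true]
          rw [PySem.Chars.join_cons_cons]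
          simp
          exact hJ
        · rw [bAlt_scan_ins _ 0 hsc (by simp [hl, hc0])]
          simp only [hc0, decide_false]
          rw [PySem.Chars.join_cons_cons]
          simp [hl]
          exact hJ

-- ===== VERDICT (by name: the statement is the Claim_ definition above) =====
theorem format_passage_for_display_py_spec : Claim_equal_format_passage_for_display_py := by
  intro text _
  unfold Spec_format_passage_for_display_py format_passage_for_display_py format_passage_for_display_py_alt
  set cs := PySem.Chars.replace text.toList "\r\n".toList "\n".toList with hcs
  rw [splitOn_bridge cs '\n']
  have hrecon : PySem.Chars.join ['\n'] (cs.splitOn '\n') = cs :=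
    List.intercalate_splitOn cs '\n'
  have hne : cs.splitOn '\n' ≠ [] := by
    simpa [List.splitOn] using List.splitOnP_ne_nil (fun a => a == '\n') cs
  have hnl : ∀ l ∈ cs.splitOn '\n', '\n' ∉ l := not_mem_of_mem_splitOn '\n' cs
  rw [← bAlt_eq_fix (cs.splitOn '\n') hne hnl, hrecon]
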